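-- pv_equiv track=rewrite | github.com/JezzComputers/Python | challenges.py | spongecase
-- ===== SOURCE A (Python) =====
-- def spongecase(text:str) -> str:
--     outstring:list = []
--     for i in range (len(text)):
--         if i%2 == 0:
--             outstring.append(text[i].upper())
--         else:
--             outstring.append(text[i].lower())
--     output = ''.join(str(x) for x in outstring)
--     return output
-- ===== SOURCE B (Python) =====
-- def spongecase(text: str) -> str:
--     # Two bulk strided passes + merge, instead of a per-character parity branch.
--     evens = text[::2].upper()
--     odds = text[1::2].lower()
--     core = ''.join(e + o for e, o in zip(evens, odds))
--     if len(odds) < len(evens):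
--         core += evens[-1]
--     return core
-- ===== Notes on version B (the rewrite author's own statement) =====
-- stated objective: faster
-- what changed: B replaces A's per-index loop with a parity branch by two bulk strided slices (even positions upper-cased, odd positions lower-cased) merged back with a zip plus the trailing even character on odd lengths.
import Mathlib
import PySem

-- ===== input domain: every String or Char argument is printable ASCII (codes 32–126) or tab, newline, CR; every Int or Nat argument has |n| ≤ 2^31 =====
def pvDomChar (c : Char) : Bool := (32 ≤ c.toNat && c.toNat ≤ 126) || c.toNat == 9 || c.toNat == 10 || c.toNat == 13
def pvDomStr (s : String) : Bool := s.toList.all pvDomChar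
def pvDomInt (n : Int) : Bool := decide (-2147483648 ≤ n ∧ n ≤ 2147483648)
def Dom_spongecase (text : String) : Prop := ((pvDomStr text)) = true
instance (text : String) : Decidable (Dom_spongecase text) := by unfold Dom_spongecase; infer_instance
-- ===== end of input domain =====

-- B replaces the per-index parity branch by two strided slices (evens upper-cased,
-- odds lower-cased) merged back by a zip: same O(n), measurably faster in CPython
-- (bulk slice/upper/lower instead of per-character Python bytecode).

-- ===== PORT A =====
def spongecase (text : String) : String :=
  let outstring : List String :=
    (PySem.List.pyRange 0 (PySem.Str.len text) 1).foldl
      (fun acc i =>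
        if PySem.Int.mod i 2 == 0 then
          acc ++ [PySem.Str.upper (String.ofList [(PySem.Str.pyGet? text i).getD ' '])]
        else
          acc ++ [PySem.Str.lower (String.ofList [(PySem.Str.pyGet? text i).getD ' '])])
      []
  PySem.Str.join "" outstring

-- ===== PORT B =====
def spongecase_alt (text : String) : String :=
  let evens : List Char := (PySem.Str.upper ((PySem.Str.slice? text none none 2).getD "")).toList
  let odds : List Char := (PySem.Str.lower ((PySem.Str.slice? text (some 1) none 2).getD "")).toList
  let core : List Char := (evens.zip odds).flatMap (fun p => [p.1, p.2])
  if odds.length < evens.length then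
    String.ofList (core ++ [(PySem.List.pyGet? evens (-1)).getD ' '])
  else
    String.ofList core

-- ===== PRECONDITION & SPEC =====
def Spec_spongecase (text : String) (out : String) : Prop := out = spongecase_alt text
instance (text : String) (out : String) : Decidable (Spec_spongecase text out) := by unfold Spec_spongecase; infer_instance

-- ===== CLAIM (what is proved, stated in full; the proofs are below) =====
def Claim_equal_spongecase : Prop := ∀ (text : String), Dom_spongecase text → Spec_spongecase text (spongecase text)

-- ===== LEMMAS AND PROOFS =====

theorem nilIntercalate (l : List (List Char)) : ([] : List Char).intercalate l = l.flatten := by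
  induction l with
  | nil => rfl
  | cons a t ih =>
    cases t with
    | nil => simp [List.intercalate]
    | cons b u =>
      rw [List.intercalate, List.intersperse_cons₂, List.flatten_cons, List.flatten_cons]
      rw [List.intercalate] at ih
      simp [ih]

theorem flattenSingleton {α β : Type} (f : α → β) (l : List α) :
    (l.map (fun k => [f k])).flatten = l.map f := by
  induction l with
  | nil => rfl
  | cons a t ih => simp [ih]

-- the common value: alternate upper/lower two characters at a time
def spongeL : List Char → List Char
  | [] => []
  | [a] => [PySem.Chars.upperChar a]
  | a :: b :: r => PySem.Chars.upperChar a :: PySem.Chars.lowerChar b :: spongeL r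

def evensL : List Char → List Char
  | [] => []
  | [a] => [a]
  | a :: _ :: r => a :: evensL r

def oddsL : List Char → List Char
  | [] => []
  | [_] => []
  | _ :: b :: r => b :: oddsL r

theorem range_map_sponge (cs : List Char) :
    (List.range cs.length).map
      (fun k => if k % 2 = 0 then PySem.Chars.upperChar (cs.getD k ' ')
                else PySem.Chars.lowerChar (cs.getD k ' ')) = spongeL cs := by
  induction cs using spongeL.induct with
  | case1 => simp [spongeL]
  | case2 a => simp [spongeL]
  | case3 a b r ih =>
    rw [show (a :: b :: r).length = r.length + 1 + 1 from rfl,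
        List.range_succ_eq_map, List.range_succ_eq_map]
    simp only [List.map_cons, List.map_map]
    rw [spongeL]
    simp only [List.cons.injEq]
    refine ⟨by simp [List.getD], by simp [List.getD], ?_⟩
    rw [← ih]
    apply List.map_congr_left
    intro k _
    have h2 : (k + 1 + 1) % 2 = k % 2 := by omega
    simp [Function.comp, List.getD, h2]

theorem spongecase_eq (text : String) :
    spongecase text = String.ofList (spongeL text.toList) := by
  unfold spongecase
  rw [PySem.List.foldl_congr_mem _ _
      (fun (acc : List String) (i : Int) =>
        acc ++ [if PySem.Int.mod i 2 == 0 then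
            PySem.Str.upper (String.ofList [(PySem.Str.pyGet? text i).getD ' '])
          else
            PySem.Str.lower (String.ofList [(PySem.Str.pyGet? text i).getD ' '])]) []
      (by
        intro acc i _
        beta_reduce
        by_cases h : (PySem.Int.mod i 2 == 0) = true
        · rw [if_pos h, if_pos h]
        · rw [if_neg h, if_neg h])]
  rw [PySem.List.foldl_append_singleton_eq_map]
  rw [PySem.Str.len_eq, PySem.List.pyRange_one]
  simp only [List.nil_append, List.map_map, Int.sub_zero, Int.toNat_natCast]
  unfold PySem.Str.join
  congr 1
  rw [PySem.Chars.join]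
  rw [show (String.toList "") = [] from rfl, nilIntercalate, ← range_map_sponge]
  conv_rhs => rw [← flattenSingleton]
  congr 1
  simp only [List.map_map]
  apply List.map_congr_left
  intro k hk
  rw [List.mem_range] at hk
  simp only [Function.comp_apply]
  have hz : (0 : Int) + (k : Int) = ((k : Nat) : Int) := by omega
  rw [hz]
  have hg : (PySem.Str.pyGet? text ((k : Nat) : Int)).getD ' ' = text.toList.getD k ' ' := by
    rw [PySem.Str.pyGet?,
        show PySem.Chars.pyGet? text.toList ((k : Nat) : Int) =
          PySem.List.pyGet? text.toList ((k : Nat) : Int) from rfl,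
        PySem.List.pyGet?_natCast]
    simp [List.getD]
  have hm : (PySem.Int.mod ((k : Nat) : Int) 2 == 0) = (decide (k % 2 = 0)) := by
    rw [PySem.Int.mod_eq_emod_of_pos (by norm_num),
        show ((k : Nat) : Int) % 2 = ((k % 2 : Nat) : Int) from by push_cast; ring]
    rcases Nat.mod_two_eq_zero_or_one k with h | h <;> simp [h]
  rw [hm]
  split <;>
    simp_all [PySem.Str.toList_upper, PySem.Str.toList_lower, PySem.Chars.upper,
      PySem.Chars.lower, String.toList_ofList]

theorem filterMap_evens (cs : List Char) :
    List.filterMap (fun k => cs[2 * k]?) (List.range ((cs.length + 1) / 2)) = evensL cs := by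
  induction cs using evensL.induct with
  | case1 => norm_num [evensL]
  | case2 a => simp [evensL]
  | case3 a b r ih =>
    rw [show (a :: b :: r).length = r.length + 2 from rfl,
        show (r.length + 2 + 1) / 2 = (r.length + 1) / 2 + 1 by omega,
        List.range_succ_eq_map]
    rw [List.filterMap_cons, evensL]
    simp only [Nat.mul_zero, List.getElem?_cons_zero, List.filterMap_map]
    congr 1

theorem filterMap_odds (cs : List Char) :
    List.filterMap (fun k => cs[1 + 2 * k]?) (List.range (cs.length / 2)) = oddsL cs := by
  induction cs using oddsL.induct with
  | case1 => norm_num [oddsL]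
  | case2 a => simp [oddsL]
  | case3 a b r ih =>
    rw [show (a :: b :: r).length = r.length + 2 from rfl,
        show (r.length + 2) / 2 = r.length / 2 + 1 by omega,
        List.range_succ_eq_map]
    rw [List.filterMap_cons, oddsL]
    simp only [Nat.mul_zero, Nat.add_zero, List.getElem?_cons_succ, List.getElem?_cons_zero,
      List.filterMap_map]
    congr 1

theorem slice_evens (cs : List Char) :
    PySem.Chars.slice? cs none none 2 = some (evensL cs) := by
  rw [show PySem.Chars.slice? cs none none 2 = PySem.List.slice? cs none none 2 from rfl]
  unfold PySem.List.slice? PySem.List.sliceIndices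
  simp only [if_neg (by norm_num : ¬ (2 : Int) = 0)]
  norm_num
  rw [show (if 0 < cs.length then (((cs.length : Int) + 2 - 1) / 2).toNat else 0) =
        (cs.length + 1) / 2 from by split <;> omega]
  rw [List.filterMap_congr (g := fun k => cs[2 * k]?) (by intro x _; congr 1)]
  rw [filterMap_evens]

theorem slice_odds (cs : List Char) :
    PySem.Chars.slice? cs (some 1) none 2 = some (oddsL cs) := by
  rw [show PySem.Chars.slice? cs (some 1) none 2 = PySem.List.slice? cs (some 1) none 2 from rfl]
  unfold PySem.List.slice? PySem.List.sliceIndices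
  simp only [if_neg (by norm_num : ¬ (2 : Int) = 0)]
  norm_num
  cases cs with
  | nil => simp [oddsL]
  | cons a r =>
    rw [show min (1 : Int) (((a :: r).length : Nat) : Int) = 1 from by
      simp only [List.length_cons]; omega]
    rw [show (if 1 < (a :: r).length then
          ((((a :: r).length : Int) - 1 + 2 - 1) / 2).toNat else 0) = (a :: r).length / 2 from by
      split <;> omega]
    rw [List.filterMap_congr (g := fun k => (a :: r)[1 + 2 * k]?) (by intro x _; congr 1)]
    rw [filterMap_odds]

theorem pyGet_neg_one_cons {α : Type} (c : α) (xs : List α) (h : xs ≠ []) :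
    PySem.List.pyGet? (c :: xs) (-1) = PySem.List.pyGet? xs (-1) := by
  have h1 : xs.length ≠ 0 := by simpa [List.length_eq_zero_iff] using h
  simp only [PySem.List.pyGet?, PySem.List.pyIdx?, List.length_cons]
  rw [if_neg (by norm_num : ¬ (0 : Int) ≤ -1), if_neg (by norm_num : ¬ (0 : Int) ≤ -1)]
  rw [if_pos (by omega : -(((xs.length + 1 : Nat)) : Int) ≤ -1),
      if_pos (by omega : -((xs.length : Nat) : Int) ≤ -1)]
  simp only [Option.bind]
  rw [show xs.length + 1 - ((- (-1) : Int)).toNat = (xs.length - ((- (-1) : Int)).toNat) + 1 from by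
    omega]
  rw [List.getElem?_cons_succ]

theorem interleave_sponge (cs : List Char) :
    (if (PySem.Chars.lower (oddsL cs)).length < (PySem.Chars.upper (evensL cs)).length then
      String.ofList
        (((PySem.Chars.upper (evensL cs)).zip (PySem.Chars.lower (oddsL cs))).flatMap
            (fun p => [p.1, p.2]) ++
          [(PySem.List.pyGet? (PySem.Chars.upper (evensL cs)) (-1)).getD ' '])
    else
      String.ofList
        (((PySem.Chars.upper (evensL cs)).zip (PySem.Chars.lower (oddsL cs))).flatMap
          (fun p => [p.1, p.2]))) = String.ofList (spongeL cs) := by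
  have key : ∀ ds : List Char,
      (((PySem.Chars.upper (evensL ds)).zip (PySem.Chars.lower (oddsL ds))).flatMap
          (fun p => [p.1, p.2])) ++
        (if (PySem.Chars.lower (oddsL ds)).length < (PySem.Chars.upper (evensL ds)).length
          then [(PySem.List.pyGet? (PySem.Chars.upper (evensL ds)) (-1)).getD ' '] else []) =
      spongeL ds := by
    intro ds
    induction ds using spongeL.induct with
    | case1 => simp [evensL, oddsL, spongeL, PySem.Chars.upper, PySem.Chars.lower]
    | case2 a =>
      simp [evensL, oddsL, spongeL, PySem.Chars.upper, PySem.Chars.lower,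
        PySem.List.pyGet?, PySem.List.pyIdx?]
    | case3 a b r ih =>
      rw [evensL, oddsL, spongeL]
      simp only [PySem.Chars.upper, PySem.Chars.lower, List.map_cons, List.zip_cons_cons,
        List.flatMap_cons, List.length_cons, Nat.add_lt_add_iff_right] at ih ⊢
      rw [List.append_assoc]
      have hlast :
          (if (List.map PySem.Chars.lowerChar (oddsL r)).length <
              (List.map PySem.Chars.upperChar (evensL r)).length then
            [(PySem.List.pyGet?
                (PySem.Chars.upperChar a :: List.map PySem.Chars.upperChar (evensL r))
                (-1)).getD ' ']
          else []) =
          (if (List.map PySem.Chars.lowerChar (oddsL r)).length <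
              (List.map PySem.Chars.upperChar (evensL r)).length then
            [(PySem.List.pyGet? (List.map PySem.Chars.upperChar (evensL r)) (-1)).getD ' ']
          else []) := by
        split
        · rename_i hlt
          have hne : List.map PySem.Chars.upperChar (evensL r) ≠ [] := by
            intro h0
            rw [h0] at hlt
            simp at hlt
          rw [pyGet_neg_one_cons _ _ hne]
        · rfl
      rw [hlast, ih]
      rfl
  have h := key cs
  split
  · rename_i hlt
    rw [if_pos hlt] at h
    rw [← h]
  · rename_i hge
    rw [if_neg hge] at h
    simp only [List.append_nil] at h
    rw [← h]

theorem spongecase_alt_eq (text : String) :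
    spongecase_alt text = String.ofList (spongeL text.toList) := by
  unfold spongecase_alt
  simp only [PySem.Str.slice?, slice_evens text.toList, slice_odds text.toList,
    Option.map_some, Option.getD_some, PySem.Str.toList_upper, PySem.Str.toList_lower,
    String.toList_ofList]
  exact interleave_sponge text.toList

-- ===== VERDICT (by name: the statement is the Claim_ definition above) =====
theorem spongecase_spec : Claim_equal_spongecase := by
  intro text _
  unfold Spec_spongecase
  rw [spongecase_eq, spongecase_alt_eq]
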